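-- pv_equiv track=rewrite | github.com/liucijus/deps-extractor | extract-deps-pom.py | split_by_expression
-- ===== SOURCE A (Python) =====
-- def split_by_expression(text):
--     parts = []
--
--     current_part = []
--     for c in text:
--         if c == '$':
--             if len(current_part) > 0:
--                 parts.append(current_part)
--                 current_part = []
--             current_part.append(c)
--         elif c == '}':
--             current_part.append(c)
--             parts.append(current_part)
--             current_part = []
--         else:
--             current_part.append(c)
--
--     if len(current_part) > 0:
--         parts.append(current_part)
--
--     return map(lambda chars: ''.join(chars), parts)
-- ===== SOURCE B (Python) =====
-- def split_by_expression(text):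
--     def tokens(s):
--         while s:
--             if s[0] == '}':
--                 yield '}'
--                 s = s[1:]
--             else:
--                 i = 1
--                 while i < len(s) and s[i] != '$' and s[i] != '}':
--                     i += 1
--                 if i < len(s) and s[i] == '}':
--                     yield s[:i + 1]
--                     s = s[i + 1:]
--                 else:
--                     yield s[:i]
--                     s = s[i:]
--     return map(lambda t: t, tokens(text))
-- ===== Notes on version B (the rewrite author's own statement) =====
-- stated objective: alternative
-- what changed: Replaces the per-character accumulator state machine with a lazy run-based tokenizer that emits one whole segment per step (lone '}', or a head character plus its maximal run of ordinary characters plus an optional closing '}') as slices of the input.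
import Mathlib
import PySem

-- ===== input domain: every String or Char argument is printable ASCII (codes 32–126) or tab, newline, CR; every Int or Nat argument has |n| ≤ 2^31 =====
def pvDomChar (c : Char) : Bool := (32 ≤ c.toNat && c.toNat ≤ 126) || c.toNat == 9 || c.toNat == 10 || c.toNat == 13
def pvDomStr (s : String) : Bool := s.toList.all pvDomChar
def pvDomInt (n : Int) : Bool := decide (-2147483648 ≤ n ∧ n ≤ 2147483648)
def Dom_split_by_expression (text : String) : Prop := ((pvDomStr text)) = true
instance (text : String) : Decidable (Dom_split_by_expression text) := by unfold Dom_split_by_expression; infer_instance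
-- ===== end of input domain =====

-- B replaces A's per-character accumulator state machine with a lazy run-based tokenizer
-- emitting one whole segment per step (objective: alternative; return value only — A returns
-- a map object, B a map object over a generator; both yield the same strings in order).

-- ===== PORT A =====
-- the loop body of A, one character step on the state (parts, current_part)
def pvStep (st : List (List Char) × List Char) (c : Char) : List (List Char) × List Char :=
  if c = '$' then
    if st.2.length > 0 then (st.1 ++ [st.2], [c]) else (st.1, st.2 ++ [c])
  else if c = '}' then
    (st.1 ++ [st.2 ++ [c]], [])
  else
    (st.1, st.2 ++ [c])

def split_by_expression (text : String) : List String :=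
  let r := text.toList.foldl pvStep ([], [])
  let parts := if r.2.length > 0 then r.1 ++ [r.2] else r.1
  parts.map (fun chars => String.mk chars)

-- ===== PORT B =====
-- ordinary character: neither '$' nor '}'
def pvP (d : Char) : Bool := !(d == '$') && !(d == '}')

-- Source B's tokens generator: each iteration emits a lone '}', or the head character,
-- its maximal run of ordinary characters, and an optional closing '}'.
def pvTok : List Char → List String
  | [] => []
  | c :: rest =>
    if c = '}' then String.mk [c] :: pvTok rest
    else
      let run := rest.takeWhile pvP
      let rest2 := rest.dropWhile pvP
      if rest2.head? = some '}' then
        String.mk (c :: (run ++ ['}'])) :: pvTok rest2.tail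
      else
        String.mk (c :: run) :: pvTok rest2
  termination_by l => l.length
  decreasing_by
  · simp
  · have h1 := List.length_dropWhile_le (p := pvP) (l := rest)
    have h2 := List.length_tail (l := rest.dropWhile pvP)
    simp only [List.length_cons]
    omega
  · have h1 := List.length_dropWhile_le (p := pvP) (l := rest)
    simp only [List.length_cons]
    omega

def split_by_expression_alt (text : String) : List String :=
  pvTok text.toList

-- ===== PRECONDITION & SPEC =====
def Spec_split_by_expression (text : String) (out : List String) : Prop := out = split_by_expression_alt text
instance (text : String) (out : List String) : Decidable (Spec_split_by_expression text out) := by unfold Spec_split_by_expression; infer_instance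

-- ===== CLAIM (what is proved, stated in full; the proofs are below) =====
def Claim_equal_split_by_expression : Prop := ∀ (text : String), Dom_split_by_expression text → Spec_split_by_expression text (split_by_expression text)

-- ===== LEMMAS AND PROOFS =====

-- a recursive characterisation of A's loop: tokens still to be produced, given pending current_part
def pvToks : List Char → List Char → List (List Char)
  | cur, [] => if cur.length > 0 then [cur] else []
  | cur, c :: rest =>
    if c = '$' then
      if cur.length > 0 then cur :: pvToks [c] rest else pvToks (cur ++ [c]) rest
    else if c = '}' then
      (cur ++ [c]) :: pvToks [] rest
    else
      pvToks (cur ++ [c]) rest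
  termination_by _ l => l.length

def pvFinish (r : List (List Char) × List Char) : List (List Char) :=
  if r.2.length > 0 then r.1 ++ [r.2] else r.1

theorem pvFoldl_toks (l : List Char) : ∀ parts cur,
    pvFinish (l.foldl pvStep (parts, cur)) = parts ++ pvToks cur l := by
  induction l with
  | nil => intro parts cur; simp [pvFinish, pvToks]; split <;> simp
  | cons c rest ih =>
    intro parts cur
    by_cases h1 : c = '$'
    · by_cases h2 : cur.length > 0 <;>
        simp [pvStep, pvToks, h1, h2, List.foldl_cons, ih, List.append_assoc]
    · by_cases h2 : c = '}' <;>
        simp [pvStep, pvToks, h1, h2, List.foldl_cons, ih, List.append_assoc]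

theorem pvToks_run (r : List Char) : ∀ s cur, (∀ d ∈ r, pvP d = true) →
    pvToks cur (r ++ s) = pvToks (cur ++ r) s := by
  induction r with
  | nil => simp
  | cons d t ih =>
    intro s cur hall
    have hd : pvP d = true := hall d (by simp)
    have h1 : ¬ d = '$' := by simp [pvP] at hd; exact fun h => hd.1 (by simp [h])
    have h2 : ¬ d = '}' := by simp [pvP] at hd; exact fun h => hd.2 (by simp [h])
    simp only [List.cons_append, pvToks, h1, h2, if_false]
    rw [ih s (cur ++ [d]) (fun e he => hall e (by simp [he])), List.append_assoc]
    simp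

theorem pvToks_flush (cur : List Char) (hc : cur ≠ []) (s : List Char)
    (hs : s = [] ∨ ∃ t, s = '$' :: t) : pvToks cur s = cur :: pvToks [] s := by
  rcases hs with h | ⟨t, h⟩ <;> subst h
  · simp [pvToks, List.length_pos_iff.mpr hc]
  · simp [pvToks, List.length_pos_iff.mpr hc]

theorem pvToks_start (c : Char) (rest : List Char) (hc : ¬ c = '}') :
    pvToks [] (c :: rest) = pvToks [c] rest := by
  by_cases h1 : c = '$' <;> simp [pvToks, h1, hc]

theorem pvTok_eq_toks_aux : ∀ (n : Nat) (l : List Char), l.length ≤ n →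
    pvTok l = (pvToks [] l).map String.mk := by
  intro n
  induction n with
  | zero =>
    intro l hl
    have hnil : l = [] := by cases l <;> simp_all
    subst hnil; simp [pvTok, pvToks]
  | succ n ih =>
    intro l hl
    cases l with
    | nil => simp [pvTok, pvToks]
    | cons c rest =>
      have hr : rest.length ≤ n := by simpa using hl
      by_cases hc : c = '}'
      · subst hc
        simp [pvTok, pvToks, ih rest hr]
      · have hdl := List.length_dropWhile_le (p := pvP) (l := rest)
        have hrest : rest = rest.takeWhile pvP ++ rest.dropWhile pvP := by
          rw [List.takeWhile_append_dropWhile]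
        have hruns : pvToks [] (c :: rest)
            = pvToks (c :: rest.takeWhile pvP) (rest.dropWhile pvP) := by
          rw [pvToks_start c rest hc]
          conv_lhs => rw [hrest]
          exact pvToks_run _ _ _ (fun d hd => List.mem_takeWhile_imp hd)
        rw [pvTok]
        simp only [if_neg hc]
        cases hd : rest.dropWhile pvP with
        | nil =>
          simp only [List.head?_nil, List.tail_nil, reduceCtorEq, if_false]
          rw [hruns, hd]
          simp [pvToks, pvTok]
        | cons d t =>
          have hdP : pvP d = false := by
            have hh := List.head?_dropWhile_not pvP rest
            rw [hd] at hh; simpa using hh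
          have ht : t.length ≤ n := by
            have := hd ▸ hdl; simp at this; omega
          by_cases hd2 : d = '}'
          · subst hd2
            simp only [List.head?_cons, List.tail_cons]
            rw [hruns, hd]
            simp [pvToks, ih t ht]
          · have hd1 : d = '$' := by
              by_contra hcon
              simp [pvP, hcon, hd2] at hdP
            subst hd1
            simp only [List.head?_cons]
            rw [if_neg (by simp)]
            rw [hruns, hd]
            have hflush := pvToks_flush (c :: rest.takeWhile pvP) (by simp)
              ('$' :: t) (Or.inr ⟨t, rfl⟩)
            rw [hflush]
            have ht' : ('$' :: t).length ≤ n := by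
              have h3 := hd ▸ hdl; simp at h3 ⊢; omega
            simp [ih ('$' :: t) ht']

theorem pvTok_eq_toks (l : List Char) : pvTok l = (pvToks [] l).map String.mk :=
  pvTok_eq_toks_aux l.length l (le_refl _)

-- ===== VERDICT (by name: the statement is the Claim_ definition above) =====
theorem split_by_expression_spec : Claim_equal_split_by_expression := by
  intro text _
  unfold Spec_split_by_expression split_by_expression split_by_expression_alt
  rw [pvTok_eq_toks]
  have := pvFoldl_toks text.toList [] []
  simp only [List.nil_append] at this
  simp [pvFinish] at this
  simp [this]
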